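-- pv_equiv track=rewrite | github.com/ntnlmg/College | Semester 4/Kriptografi/AES_128.py | fill_array_by_column
-- ===== SOURCE A (Python) =====
-- def fill_array_by_column(n_rows, n_columns, value):
--     matrix = []
--     x = 0
--     for i in range(0, n_rows):
--         l = []
--         for j in range(0, n_columns):
--             l.append(value[x:x + 2])
--             x = x + 2
--         matrix.append(l)
--     return matrix
-- ===== SOURCE B (Python) =====
-- def fill_array_by_column(n_rows, n_columns, value):
--     rows = max(n_rows, 0)
--     cols = max(n_columns, 0)
--     total = rows * cols
--     chunks = [value[2 * k:2 * k + 2] for k in range(total)]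
--     return [chunks[i * cols:(i + 1) * cols] for i in range(rows)]
-- ===== Notes on version B (the rewrite author's own statement) =====
-- stated objective: alternative
-- what changed: Replaces A's nested fill loops with a single flat comprehension of exactly rows*cols two-char slices followed by a reshape that partitions the flat list by slicing.
import Mathlib
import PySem

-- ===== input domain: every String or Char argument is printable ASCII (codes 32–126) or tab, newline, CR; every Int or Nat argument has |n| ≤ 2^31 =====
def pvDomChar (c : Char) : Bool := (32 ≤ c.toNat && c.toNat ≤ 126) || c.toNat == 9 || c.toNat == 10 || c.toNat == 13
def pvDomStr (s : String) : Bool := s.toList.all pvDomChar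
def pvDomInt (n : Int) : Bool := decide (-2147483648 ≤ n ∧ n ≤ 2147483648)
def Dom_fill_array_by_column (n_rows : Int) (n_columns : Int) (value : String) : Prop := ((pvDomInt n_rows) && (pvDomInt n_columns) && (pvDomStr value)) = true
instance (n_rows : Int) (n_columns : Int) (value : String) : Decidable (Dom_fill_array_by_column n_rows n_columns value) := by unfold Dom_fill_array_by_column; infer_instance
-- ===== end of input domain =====

-- B replaces A's nested fill loops with a flat list of exactly rows*cols two-char
-- slices reshaped by slicing; alternative decomposition, same cost.

-- ===== PORT A =====
def fill_array_by_column (n_rows : Int) (n_columns : Int) (value : String) : List (List String) :=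
  -- matrix = []; x = 0; nested for-loops appending value[x:x+2]
  let res :=
    (PySem.List.pyRange 0 n_rows 1).foldl
      (fun (st : List (List String) × Int) _i =>
        let inner :=
          (PySem.List.pyRange 0 n_columns 1).foldl
            (fun (p : List String × Int) _j =>
              (p.1 ++ [PySem.Str.slice value (some p.2) (some (p.2 + 2))], p.2 + 2))
            ([], st.2)
        (st.1 ++ [inner.1], inner.2))
      ([], 0)
  res.1

-- ===== PORT B =====
def fill_array_by_column_alt (n_rows : Int) (n_columns : Int) (value : String) : List (List String) :=
  let rows := max n_rows 0
  let cols := max n_columns 0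
  let total := rows * cols
  let chunks := (PySem.List.pyRange 0 total 1).map
    (fun k => PySem.Str.slice value (some (2 * k)) (some (2 * k + 2)))
  (PySem.List.pyRange 0 rows 1).map
    (fun i => PySem.List.slice chunks (some (i * cols)) (some ((i + 1) * cols)))

-- ===== PRECONDITION & SPEC =====
def Spec_fill_array_by_column (n_rows : Int) (n_columns : Int) (value : String) (out : List (List String)) : Prop := out = fill_array_by_column_alt n_rows n_columns value
instance (n_rows : Int) (n_columns : Int) (value : String) (out : List (List String)) : Decidable (Spec_fill_array_by_column n_rows n_columns value out) := by unfold Spec_fill_array_by_column; infer_instance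

-- ===== CLAIM (what is proved, stated in full; the proofs are below) =====
def Claim_equal_fill_array_by_column : Prop := ∀ (n_rows : Int) (n_columns : Int) (value : String), Dom_fill_array_by_column n_rows n_columns value → Spec_fill_array_by_column n_rows n_columns value (fill_array_by_column n_rows n_columns value)

-- ===== LEMMAS AND PROOFS =====

-- the common normal form both ports reduce to
def pvChunk (value : String) (k : Int) : String :=
  PySem.Str.slice value (some (2 * k)) (some (2 * k + 2))

def pvNorm (r c : Nat) (value : String) : List (List String) :=
  (List.range r).map (fun (i : Nat) =>
    (List.range c).map (fun (j : Nat) => pvChunk value ((i * c + j : Nat) : Int)))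

theorem inner_fold_eq (value : String) (c : Nat) (x : Int) :
    (List.range c).foldl
        (fun (p : List String × Int) (_j : Nat) =>
          (p.1 ++ [PySem.Str.slice value (some p.2) (some (p.2 + 2))], p.2 + 2))
        ([], x)
      = ((List.range c).map (fun (j : Nat) =>
           PySem.Str.slice value (some (x + 2 * (j : Int))) (some (x + 2 * (j : Int) + 2))),
         x + 2 * (c : Int)) := by
  induction c with
  | zero => simp
  | succ n ih =>
    rw [List.range_succ, List.foldl_append, ih]
    simp only [List.foldl_cons, List.foldl_nil, List.map_append, List.map_cons, List.map_nil,
      Prod.mk.injEq]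
    exact ⟨trivial, by push_cast; ring⟩

theorem outer_fold_eq (value : String) (c : Nat) (r : Nat) (acc : List (List String)) (x : Int) :
    (List.range r).foldl
        (fun (st : List (List String) × Int) (_i : Nat) =>
          let inner :=
            (List.range c).foldl
              (fun (p : List String × Int) (_j : Nat) =>
                (p.1 ++ [PySem.Str.slice value (some p.2) (some (p.2 + 2))], p.2 + 2))
              ([], st.2)
          (st.1 ++ [inner.1], inner.2))
        (acc, x)
      = (acc ++ (List.range r).map (fun (i : Nat) =>
            (List.range c).map (fun (j : Nat) =>
              PySem.Str.slice value (some (x + 2 * (c : Int) * i + 2 * (j : Int)))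
                                    (some (x + 2 * (c : Int) * i + 2 * (j : Int) + 2)))),
         x + 2 * (c : Int) * r) := by
  induction r generalizing acc x with
  | zero => simp
  | succ n ih =>
    rw [List.range_succ, List.foldl_append, ih]
    simp only [List.foldl_cons, List.foldl_nil, inner_fold_eq, List.map_append, List.map_cons,
      List.map_nil, List.append_assoc, Prod.mk.injEq]
    exact ⟨trivial, by push_cast; ring⟩

theorem portA_eq_norm (n_rows n_columns : Int) (value : String) :
    fill_array_by_column n_rows n_columns value = pvNorm n_rows.toNat n_columns.toNat value := by
  unfold fill_array_by_column pvNorm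
  rw [PySem.List.pyRange_one, PySem.List.pyRange_one]
  simp only [List.foldl_map]
  rw [outer_fold_eq]
  simp only [Int.sub_zero, List.nil_append]
  apply List.map_congr_left
  intro i _
  apply List.map_congr_left
  intro j _
  unfold pvChunk
  congr 2 <;> push_cast <;> ring

theorem portB_eq_norm (n_rows n_columns : Int) (value : String) :
    fill_array_by_column_alt n_rows n_columns value = pvNorm n_rows.toNat n_columns.toNat value := by
  unfold fill_array_by_column_alt pvNorm
  set r := n_rows.toNat with hr
  set c := n_columns.toNat with hc
  have hrows : max n_rows 0 = (r : Int) := by omega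
  have hcols : max n_columns 0 = (c : Int) := by omega
  simp only [hrows, hcols]
  have htot : (r : Int) * (c : Int) = ((r * c : Nat) : Int) := by push_cast; ring
  rw [htot, PySem.List.pyRange_one, PySem.List.pyRange_one]
  simp only [Int.sub_zero, Int.toNat_natCast, List.map_map]
  apply List.ext_getElem
  · simp
  intro i h1 h2
  simp only [List.getElem_map, List.getElem_range, Function.comp_apply]
  have hi : i < r := by simpa using h1
  have hb1 : ((0 : Int) + (i : Int)) * (c : Int) = ((i * c : Nat) : Int) := by push_cast; ring
  have hb2 : ((0 : Int) + (i : Int) + 1) * (c : Int) = (((i + 1) * c : Nat) : Int) := by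
    push_cast; ring
  rw [hb1, hb2, PySem.List.slice_natCast]
  have hle : i * c + c ≤ r * c := by
    have h := Nat.mul_le_mul_right c (show i + 1 ≤ r by omega)
    rwa [Nat.succ_mul] at h
  have hsub : (i + 1) * c - i * c = c := by rw [Nat.succ_mul]; omega
  rw [hsub]
  apply List.ext_getElem
  · simp only [List.length_take, List.length_drop, List.length_map, List.length_range]
    omega
  intro j hj1 hj2
  have hjc : j < c := by simpa using hj2
  have hlt : i * c + j < r * c := by omega
  simp only [List.getElem_take, List.getElem_drop, List.getElem_map, List.getElem_range,
    Function.comp_apply]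
  unfold pvChunk
  congr 2 <;> push_cast <;> ring

-- ===== VERDICT (by name: the statement is the Claim_ definition above) =====
theorem fill_array_by_column_spec : Claim_equal_fill_array_by_column := by
  intro n_rows n_columns value _
  unfold Spec_fill_array_by_column
  rw [portA_eq_norm, portB_eq_norm]
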